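-- pv_equiv track=rewrite | github.com/Roubish/llm_rag_sql_assistant | llm_rag_sql_assistant.py | detect_timestamp_col
-- ===== SOURCE A (Python) =====
-- from typing import Optional, Tuple, Dict, Any, List
--
-- def detect_timestamp_col(alerts_cols: List[str]) -> Optional[str]:
--     # choose sensible timestamp-like column from list
--     candidates = ["alert_time", "created_at", "timestamp", "time", "created", "date", "alert_timestamp", "ts"]
--     for c in candidates:
--         if c in alerts_cols:
--             return c
--     for c in alerts_cols:
--         if "time" in c or "date" in c or "ts" in c:
--             return c
--     return None
-- ===== SOURCE B (Python) =====
-- from typing import Optional, List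
--
--
-- def _score(col, prio, sentinel):
--     # priority of a column: candidate index for an exact match,
--     # sentinel for a fuzzy (substring) match, None if it does not qualify
--     if col in prio:
--         return prio[col]
--     if "time" in col or "date" in col or "ts" in col:
--         return sentinel
--     return None
--
--
-- def detect_timestamp_col(alerts_cols: List[str]) -> Optional[str]:
--     # single scan: keep the first column achieving the minimal score
--     candidates = ["alert_time", "created_at", "timestamp", "time", "created", "date", "alert_timestamp", "ts"]
--     prio = {name: i for i, name in enumerate(candidates)}
--     sentinel = len(candidates)
--     best_score = None
--     best_col = None
--     for col in alerts_cols: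
--         s = _score(col, prio, sentinel)
--         if s is None:
--             continue
--         if best_score is None or s < best_score:
--             best_score, best_col = s, col
--     return best_col
-- ===== Notes on version B (the rewrite author's own statement) =====
-- stated objective: alternative
-- what changed: Replaces A's two sequential early-return loops (candidates scan then substring scan) by a single pass over the columns that scores each column via a precomputed candidate-index map (substring matches get a sentinel score) and keeps the first column with the minimal score.
import Mathlib
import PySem

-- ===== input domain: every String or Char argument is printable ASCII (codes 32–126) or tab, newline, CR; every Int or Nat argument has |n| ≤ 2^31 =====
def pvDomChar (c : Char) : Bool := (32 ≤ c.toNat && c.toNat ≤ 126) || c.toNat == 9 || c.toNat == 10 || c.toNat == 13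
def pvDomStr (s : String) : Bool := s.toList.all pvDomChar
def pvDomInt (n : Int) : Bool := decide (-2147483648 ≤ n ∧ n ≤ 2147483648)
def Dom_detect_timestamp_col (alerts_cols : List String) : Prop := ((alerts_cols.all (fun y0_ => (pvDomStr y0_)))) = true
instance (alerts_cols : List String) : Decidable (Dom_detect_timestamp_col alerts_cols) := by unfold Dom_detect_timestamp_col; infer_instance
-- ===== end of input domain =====

-- B replaces A's two sequential early-return loops by a single scored scan over the
-- columns using a candidate-index map (alternative decomposition, same behaviour).


-- ===== PORT A =====
-- candidates list of A
def pvACandidates : List String :=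
  ["alert_time", "created_at", "timestamp", "time", "created", "date", "alert_timestamp", "ts"]

-- '"time" in c or "date" in c or "ts" in c'  (PySem.Str.isIn sub s = Python 'sub in s', exact)
def pvASub (c : String) : Bool :=
  PySem.Str.isIn "time" c || PySem.Str.isIn "date" c || PySem.Str.isIn "ts" c

-- A: first loop = first candidate contained in alerts_cols; second loop = first substring match
def detect_timestamp_col (alerts_cols : List String) : Option String :=
  match pvACandidates.find? (fun c => alerts_cols.contains c) with
  | some c => some c
  | none => alerts_cols.find? (fun c => pvASub c)

-- ===== PORT B =====
def pvBCandidates : List String :=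
  ["alert_time", "created_at", "timestamp", "time", "created", "date", "alert_timestamp", "ts"]

-- prio = {name: i for i, name in enumerate(candidates)}
def pvBPrio : PySem.Dict String Int :=
  (PySem.List.enumerate pvBCandidates).foldl (fun d p => d.insert p.2 p.1) PySem.Dict.empty

-- sentinel = len(candidates)
def pvBSentinel : Int := (pvBCandidates.length : Int)

-- '"time" in col or "date" in col or "ts" in col'
def pvBSub (col : String) : Bool :=
  PySem.Str.isIn "time" col || PySem.Str.isIn "date" col || PySem.Str.isIn "ts" col

-- _score(col, prio, sentinel)
def pvBScore (col : String) : Option Int :=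
  match pvBPrio.get? col with
  | some s => some s
  | none => if pvBSub col then some pvBSentinel else none

-- one iteration of B's loop over (best_score, best_col)
def pvBStep (acc : Option (Int × String)) (col : String) : Option (Int × String) :=
  match pvBScore col with
  | none => acc
  | some s =>
    match acc with
    | none => some (s, col)
    | some (s0, c0) => if s < s0 then some (s, col) else some (s0, c0)

def detect_timestamp_col_alt (alerts_cols : List String) : Option String :=
  (alerts_cols.foldl pvBStep none).map Prod.snd

-- ===== PRECONDITION & SPEC =====
def Spec_detect_timestamp_col (alerts_cols : List String) (out : Option String) : Prop := out = detect_timestamp_col_alt alerts_cols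
instance (alerts_cols : List String) (out : Option String) : Decidable (Spec_detect_timestamp_col alerts_cols out) := by unfold Spec_detect_timestamp_col; infer_instance

-- ===== CLAIM (what is proved, stated in full; the proofs are below) =====
def Claim_equal_detect_timestamp_col : Prop := ∀ (alerts_cols : List String), Dom_detect_timestamp_col alerts_cols → Spec_detect_timestamp_col alerts_cols (detect_timestamp_col alerts_cols)

-- ===== LEMMAS AND PROOFS =====

-- B's loop state after the whole scan
def pvR (xs : List String) : Option (Int × String) := xs.foldl pvBStep none

-- left-biased 'keep the strictly better score' combination
def pvMerge (a b : Option (Int × String)) : Option (Int × String) :=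
  match a, b with
  | none, b => b
  | some a, none => some a
  | some (s0, c0), some (s, c) => if s < s0 then some (s, c) else some (s0, c0)

theorem pvMerge_none_right (a : Option (Int × String)) : pvMerge a none = a := by
  rcases a with _ | ⟨s, c⟩ <;> rfl

theorem pvBStep_merge (acc : Option (Int × String)) (col : String) :
    pvBStep acc col = pvMerge acc (pvBStep none col) := by
  rcases acc with _ | ⟨s0, c0⟩ <;> cases h : pvBScore col <;>
    simp [pvBStep, pvMerge, h]

theorem pvMerge_assoc (a b c : Option (Int × String)) :
    pvMerge (pvMerge a b) c = pvMerge a (pvMerge b c) := by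
  rcases a with _ | ⟨sa, ca⟩ <;> rcases b with _ | ⟨sb, cb⟩ <;> rcases c with _ | ⟨sc, cc⟩ <;>
    first
      | rfl
      | rw [pvMerge_none_right, pvMerge_none_right]
      | (by_cases h1 : sb < sa <;> by_cases h2 : sc < sb <;>
          simp [pvMerge, h1, h2] <;> first | rfl | omega)

theorem pvFoldl_merge (xs : List String) :
    ∀ acc, xs.foldl pvBStep acc = pvMerge acc (xs.foldl pvBStep none) := by
  induction xs with
  | nil => intro acc; simp [List.foldl, pvMerge_none_right]
  | cons c xs ih =>
    intro acc
    simp only [List.foldl]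
    rw [ih (pvBStep acc c), ih (pvBStep none c), pvBStep_merge acc c, pvMerge_assoc]

theorem pvR_cons (c : String) (xs : List String) :
    pvR (c :: xs) = pvMerge (pvBStep none c) (pvR xs) := by
  simp only [pvR, List.foldl]
  rw [pvFoldl_merge xs (pvBStep none c)]

theorem pvR_sound (xs : List String) :
    ∀ s c, pvR xs = some (s, c) → c ∈ xs ∧ pvBScore c = some s := by
  induction xs with
  | nil => intro s c h; simp [pvR, List.foldl] at h
  | cons x xs ih =>
    intro s c h
    rw [pvR_cons] at h
    cases hx : pvBScore x with
    | none =>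
      simp only [pvBStep, hx, pvMerge] at h
      rcases ih s c h with ⟨hm, hs⟩
      exact ⟨List.mem_cons_of_mem _ hm, hs⟩
    | some sx =>
      simp only [pvBStep, hx] at h
      cases hr : pvR xs with
      | none =>
        rw [hr, pvMerge_none_right] at h
        obtain ⟨rfl, rfl⟩ : sx = s ∧ x = c := by simpa using h
        exact ⟨List.mem_cons_self, hx⟩
      | some p =>
        rcases p with ⟨s1, c1⟩
        rw [hr] at h
        simp only [pvMerge] at h
        split_ifs at h
        · rcases ih s c (by rw [hr, h]) with ⟨hm, hs⟩
          exact ⟨List.mem_cons_of_mem _ hm, hs⟩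
        · obtain ⟨rfl, rfl⟩ : sx = s ∧ x = c := by simpa using h
          exact ⟨List.mem_cons_self, hx⟩

theorem pvR_le (xs : List String) :
    ∀ c s, c ∈ xs → pvBScore c = some s → ∃ s' c', pvR xs = some (s', c') ∧ s' ≤ s := by
  induction xs with
  | nil => intro c s h; simp at h
  | cons x xs ih =>
    intro c s hmem hs
    rw [pvR_cons]
    rcases List.mem_cons.mp hmem with rfl | hmem
    · simp only [pvBStep, hs]
      cases hr : pvR xs with
      | none => exact ⟨s, c, by rw [pvMerge_none_right], le_refl s⟩
      | some p =>
        rcases p with ⟨s1, c1⟩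
        simp only [pvMerge]
        split_ifs with hlt
        · exact ⟨s1, c1, rfl, le_of_lt hlt⟩
        · exact ⟨s, c, rfl, le_refl s⟩
    · rcases ih c s hmem hs with ⟨s', c', hr, hle⟩
      rw [hr]
      cases hx : pvBScore x with
      | none => simp only [pvBStep, hx, pvMerge]; exact ⟨s', c', rfl, hle⟩
      | some sx =>
        simp only [pvBStep, hx, pvMerge]
        split_ifs with hlt
        · exact ⟨s', c', rfl, hle⟩
        · exact ⟨sx, x, rfl, le_trans (by omega) hle⟩

-- the priority dict as nested conditionals
theorem pvPrio_get (c : String) : pvBPrio.get? c =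
    if "alert_time" = c then some 0 else if "created_at" = c then some 1 else
    if "timestamp" = c then some 2 else if "time" = c then some 3 else
    if "created" = c then some 4 else if "date" = c then some 5 else
    if "alert_timestamp" = c then some 6 else if "ts" = c then some 7 else none := by
  have hp : pvBPrio = PySem.Dict.mk [("alert_time", 0), ("created_at", 1), ("timestamp", 2),
      ("time", 3), ("created", 4), ("date", 5), ("alert_timestamp", 6), ("ts", 7)] := by decide
  rw [hp]
  simp only [PySem.Dict.get?_mk_cons, beq_iff_eq]
  rfl

-- concrete evaluation of the score
theorem pvScore_cases (c : String) (s : Int) (h : pvBScore c = some s) :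
    (s = 0 ∧ c = "alert_time") ∨ (s = 1 ∧ c = "created_at") ∨ (s = 2 ∧ c = "timestamp") ∨
    (s = 3 ∧ c = "time") ∨ (s = 4 ∧ c = "created") ∨ (s = 5 ∧ c = "date") ∨
    (s = 6 ∧ c = "alert_timestamp") ∨ (s = 7 ∧ c = "ts") ∨ (s = 8 ∧ pvBSub c = true) := by
  unfold pvBScore at h
  rw [pvPrio_get] at h
  split_ifs at h with h0 h1 h2 h3 h4 h5 h6 h7 <;> simp_all [pvBSentinel, pvBCandidates]

theorem pvScore_of_not_cand (c : String) (h : c ∉ pvACandidates) :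
    pvBScore c = if pvBSub c then some 8 else none := by
  simp only [pvACandidates, List.mem_cons, not_or] at h
  unfold pvBScore
  rw [pvPrio_get]
  rw [if_neg (fun he => h.1 he.symm), if_neg (fun he => h.2.1 he.symm),
    if_neg (fun he => h.2.2.1 he.symm), if_neg (fun he => h.2.2.2.1 he.symm),
    if_neg (fun he => h.2.2.2.2.1 he.symm), if_neg (fun he => h.2.2.2.2.2.1 he.symm),
    if_neg (fun he => h.2.2.2.2.2.2.1 he.symm), if_neg (fun he => h.2.2.2.2.2.2.2.1 he.symm)]
  simp [pvBSentinel, pvBCandidates]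

-- position helper for the case-1 argument
theorem pvCase1_aux (xs as bs : List String) (cj : String) (i : Nat) (str : String)
    (hdec : pvACandidates = as ++ cj :: bs)
    (hstr : pvACandidates[i]? = some str)
    (hpre : ∀ a ∈ as, a ∉ xs)
    (hmem : str ∈ xs) (hle : i ≤ as.length) :
    i = as.length ∧ cj = str := by
  rcases Nat.lt_or_ge i as.length with hlt | hge
  · exfalso
    apply hpre str _ hmem
    rw [hdec] at hstr
    rw [List.getElem?_append_left hlt] at hstr
    exact List.mem_of_getElem? hstr
  · have heq : i = as.length := le_antisymm hle hge
    subst heq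
    rw [hdec] at hstr
    rw [List.getElem?_append_right (le_refl _)] at hstr
    simp at hstr
    exact ⟨rfl, hstr⟩

-- if some candidate occurs in xs, B's scan returns the first present candidate
theorem pvCase1 (xs as bs : List String) (cj : String)
    (hdec : pvACandidates = as ++ cj :: bs)
    (hin : cj ∈ xs) (hpre : ∀ a ∈ as, a ∉ xs) :
    pvR xs = some ((as.length : Int), cj) := by
  have hlen : as.length + bs.length + 1 = 8 := by
    have := congrArg List.length hdec
    simp [pvACandidates] at this
    omega
  have hcjstr : pvACandidates[as.length]? = some cj := by
    rw [hdec, List.getElem?_append_right (le_refl _)]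
    simp
  have hsc : pvBScore cj = some (as.length : Int) := by
    have h8 : as.length < 8 := by omega
    have hall : ∀ j : Nat, j < 8 → ∀ c : String, pvACandidates[j]? = some c → pvBScore c = some (j : Int) := by
      decide
    exact hall as.length h8 cj hcjstr
  obtain ⟨s', c', hR, hle⟩ := pvR_le xs cj (as.length : Int) hin hsc
  obtain ⟨hmem', hsc'⟩ := pvR_sound xs s' c' hR
  rcases pvScore_cases c' s' hsc' with ⟨rfl, rfl⟩ | ⟨rfl, rfl⟩ | ⟨rfl, rfl⟩ | ⟨rfl, rfl⟩ |
    ⟨rfl, rfl⟩ | ⟨rfl, rfl⟩ | ⟨rfl, rfl⟩ | ⟨rfl, rfl⟩ | ⟨rfl, hsub⟩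
  · obtain ⟨hj, rfl⟩ := pvCase1_aux xs as bs cj 0 _ hdec (by decide) hpre hmem' (by omega)
    rw [hR, ← hj]; simp
  · obtain ⟨hj, rfl⟩ := pvCase1_aux xs as bs cj 1 _ hdec (by decide) hpre hmem' (by omega)
    rw [hR, ← hj]; simp
  · obtain ⟨hj, rfl⟩ := pvCase1_aux xs as bs cj 2 _ hdec (by decide) hpre hmem' (by omega)
    rw [hR, ← hj]; simp
  · obtain ⟨hj, rfl⟩ := pvCase1_aux xs as bs cj 3 _ hdec (by decide) hpre hmem' (by omega)
    rw [hR, ← hj]; simp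
  · obtain ⟨hj, rfl⟩ := pvCase1_aux xs as bs cj 4 _ hdec (by decide) hpre hmem' (by omega)
    rw [hR, ← hj]; simp
  · obtain ⟨hj, rfl⟩ := pvCase1_aux xs as bs cj 5 _ hdec (by decide) hpre hmem' (by omega)
    rw [hR, ← hj]; simp
  · obtain ⟨hj, rfl⟩ := pvCase1_aux xs as bs cj 6 _ hdec (by decide) hpre hmem' (by omega)
    rw [hR, ← hj]; simp
  · obtain ⟨hj, rfl⟩ := pvCase1_aux xs as bs cj 7 _ hdec (by decide) hpre hmem' (by omega)
    rw [hR, ← hj]; simp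
  · omega

-- if no candidate occurs in xs, B's scan returns the first substring match
theorem pvCase2 (xs : List String) (h : ∀ c ∈ xs, c ∉ pvACandidates) :
    (pvR xs).map Prod.snd = xs.find? (fun c => pvASub c) := by
  induction xs with
  | nil => rfl
  | cons x xs ih =>
    have hx := pvScore_of_not_cand x (h x List.mem_cons_self)
    have hsubeq : pvBSub x = pvASub x := rfl
    rw [pvR_cons]
    cases hs : pvBSub x with
    | true =>
      rw [hs] at hx
      simp only [if_true] at hx
      simp only [pvBStep, hx]
      rw [List.find?_cons_of_pos (by rw [← hsubeq]; exact hs)]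
      cases hr : pvR xs with
      | none => rw [pvMerge_none_right]; rfl
      | some p =>
        rcases p with ⟨s1, c1⟩
        obtain ⟨hm1, hs1⟩ := pvR_sound xs s1 c1 hr
        have h8 : s1 = 8 := by
          have := pvScore_of_not_cand c1 (h c1 (List.mem_cons_of_mem _ hm1))
          rw [this] at hs1
          split_ifs at hs1 with hw
          all_goals simp_all
        subst h8
        simp [pvMerge]
    | false =>
      rw [hs] at hx
      simp only [if_neg Bool.false_ne_true] at hx
      simp only [pvBStep, hx]
      simp only [pvMerge]
      rw [List.find?_cons_of_neg (by rw [← hsubeq]; simp [hs])]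
      exact ih (fun c hc => h c (List.mem_cons_of_mem _ hc))

-- ===== VERDICT (by name: the statement is the Claim_ definition above) =====
theorem detect_timestamp_col_spec : Claim_equal_detect_timestamp_col := by
  intro xs _
  unfold Spec_detect_timestamp_col
  show detect_timestamp_col xs = detect_timestamp_col_alt xs
  have halt : detect_timestamp_col_alt xs = (pvR xs).map Prod.snd := rfl
  unfold detect_timestamp_col
  cases hf : pvACandidates.find? (fun c => xs.contains c) with
  | none =>
    rw [halt]
    rw [List.find?_eq_none] at hf
    have h : ∀ c ∈ xs, c ∉ pvACandidates := by
      intro c hc hcand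
      exact absurd (by simpa using hc) (by simpa using hf c hcand)
    exact (pvCase2 xs h).symm
  | some cj =>
    rw [halt]
    rw [List.find?_eq_some_iff_append] at hf
    obtain ⟨hp, as, bs, hdec, hpre⟩ := hf
    have hin : cj ∈ xs := by simpa using hp
    have hpre' : ∀ a ∈ as, a ∉ xs := by
      intro a ha hax
      exact absurd (by simpa using hax) (by simpa using hpre a ha)
    rw [pvCase1 xs as bs cj hdec hin hpre']
    rfl
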